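-- pv_equiv track=rewrite | github.com/MrBrantCode/unitest_baseline | mut_generate/mist_train_taco/taco_2476/solution.py | find_min_l
-- ===== SOURCE A (Python) =====
-- def find_min_l(a, b, k):
--     def sieve(n):
--         """ Helper function to generate primes up to n using the Sieve of Eratosthenes """
--         is_prime = [True] * (n + 1)
--         is_prime[0] = is_prime[1] = False
--         for i in range(2, int(n**0.5) + 1):
--             if is_prime[i]:
--                 for j in range(i * i, n + 1, i):
--                     is_prime[j] = False
--         return [i for i in range(n + 1) if is_prime[i]]
--
--     # Generate all primes up to b
--     primes = sieve(b)
--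
--     # Filter primes to only include those greater than or equal to a
--     primes = [p for p in primes if p >= a]
--
--     # If there are fewer than k primes in the range [a, b], return -1
--     if len(primes) < k:
--         return -1
--
--     # If there are exactly k primes, the minimum l is the maximum distance
--     if len(primes) == k:
--         return max(primes[k - 1] - a + 1, b - primes[0] + 1)
--
--     # Otherwise, find the minimum l such that any subrange of length l contains at least k primes
--     min_l = max(primes[k - 1] - a + 1, b - primes[len(primes) - k] + 1)
--     for i in range(len(primes) - k):
--         min_l = max(min_l, primes[i + k] - primes[i])
--
--     return min_l
-- ===== SOURCE B (Python) =====
-- def find_min_l(a, b, k):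
--     def sieve(n):
--         """ Helper function to generate primes up to n using the Sieve of Eratosthenes """
--         is_prime = [True] * (n + 1)
--         is_prime[0] = is_prime[1] = False
--         for i in range(2, int(n**0.5) + 1):
--             if is_prime[i]:
--                 for j in range(i * i, n + 1, i):
--                     is_prime[j] = False
--         return [i for i in range(n + 1) if is_prime[i]]
--
--     primes = [p for p in sieve(b) if p >= a]
--     m = len(primes)
--     if m < k:
--         return -1
--     # The answer is the largest "needed window length" over all start
--     # positions s: the distance from s to the k-th prime at or after s,
--     # or past the right endpoint b when fewer than k primes remain.
--     # Starts at or below primes[0] are dominated by s = a, whose needed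
--     # length is primes[k-1] - a + 1; scan the remaining starts with an
--     # advancing pointer j = index of the first prime >= s.
--     ans = primes[k - 1] - a + 1
--     j = 0
--     for s in range(primes[0] + 1, b + 1):
--         while j < m and primes[j] < s:
--             j += 1
--         if j + k <= m:
--             ans = max(ans, primes[j + k - 1] - s + 1)
--         else:
--             ans = max(ans, b - s + 2)
--     return ans
-- ===== Notes on version B (the rewrite author's own statement) =====
-- stated objective: alternative
-- what changed: Keeps the sieve but replaces A's maximum over gaps between primes k apart (plus two boundary terms) by a per-start-position scan: for every window start s in [primes[0]+1, b] it computes the needed window length to reach the k-th prime at or after s via an advancing pointer, taking the maximum, seeded with the window starting at a.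
import Mathlib
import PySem

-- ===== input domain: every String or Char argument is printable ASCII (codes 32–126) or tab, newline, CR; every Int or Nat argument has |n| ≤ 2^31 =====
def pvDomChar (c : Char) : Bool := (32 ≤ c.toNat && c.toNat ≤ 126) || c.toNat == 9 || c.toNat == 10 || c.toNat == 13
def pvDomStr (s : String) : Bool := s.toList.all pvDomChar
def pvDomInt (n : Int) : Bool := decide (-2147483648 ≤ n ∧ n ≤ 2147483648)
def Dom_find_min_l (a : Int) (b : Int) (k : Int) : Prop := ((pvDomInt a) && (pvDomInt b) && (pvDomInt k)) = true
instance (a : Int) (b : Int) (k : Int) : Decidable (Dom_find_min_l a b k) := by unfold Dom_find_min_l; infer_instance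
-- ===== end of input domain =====

-- B replaces A's max over gaps between primes k apart by a per-start-position
-- scan: for every window start s it computes the needed length to reach the
-- k-th prime at or after s via an advancing pointer, and takes the maximum
-- (alternative algorithm, same O(b) cost).


-- ===== PORT A =====
-- Helper `sieve(n)`: Source A and Source B contain this function VERBATIM, so it is
-- a shared helper of both ports.  The Python bool list is a List Bool with
-- in-place assignment `List.set`; all written indices are in range on Pre_.
-- `int(n**0.5)` equals `Nat.sqrt` for 0 ≤ n ≤ 2^31 (the double sqrt is
-- exact there); for n ≤ 0 the Python raises before reaching the sqrt.
def pvSieve (n : Int) : List Int :=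
  let isp : List Bool := ((List.replicate (n + 1).toNat true).set 0 false).set 1 false
  let isp := (PySem.List.pyRange 2 ((Nat.sqrt n.toNat : Int) + 1) 1).foldl
    (fun l i =>
      if l.getD i.toNat false then
        (PySem.List.pyRange (i * i) (n + 1) i).foldl (fun l2 j => l2.set j.toNat false) l
      else l) isp
  (PySem.List.pyRange 0 (n + 1) 1).filter (fun i => isp.getD i.toNat false)

def find_min_l (a : Int) (b : Int) (k : Int) : Int :=
  let primes := (pvSieve b).filter (fun p => a ≤ p)
  if (primes.length : Int) < k then -1
  else if (primes.length : Int) = k then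
    max (PySem.List.pyGetD primes (k - 1) 0 - a + 1) (b - PySem.List.pyGetD primes 0 0 + 1)
  else
    let min_l := max (PySem.List.pyGetD primes (k - 1) 0 - a + 1)
                     (b - PySem.List.pyGetD primes ((primes.length : Int) - k) 0 + 1)
    (PySem.List.pyRange 0 ((primes.length : Int) - k) 1).foldl
      (fun m i => max m (PySem.List.pyGetD primes (i + k) 0 - PySem.List.pyGetD primes i 0)) min_l

-- ===== PORT B =====
-- the `while j < m and primes[j] < s: j += 1` loop of Source B
def pvAdvance (primes : List Int) (s : Int) (j : Int) : Int :=
  if h : j < (primes.length : Int) ∧ PySem.List.pyGetD primes j 0 < s then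
    pvAdvance primes s (j + 1)
  else j
termination_by ((primes.length : Int) - j).toNat
decreasing_by
  have := h.1
  omega

def find_min_l_alt (a : Int) (b : Int) (k : Int) : Int :=
  let primes := (pvSieve b).filter (fun p => a ≤ p)
  let m : Int := primes.length
  if m < k then -1
  else
    ((PySem.List.pyRange (PySem.List.pyGetD primes 0 0 + 1) (b + 1) 1).foldl
      (fun (st : Int × Int) s =>
        let j := pvAdvance primes s st.1
        if j + k ≤ m then (j, max st.2 (PySem.List.pyGetD primes (j + k - 1) 0 - s + 1))
        else (j, max st.2 (b - s + 2)))
      (0, PySem.List.pyGetD primes (k - 1) 0 - a + 1)).2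

-- ===== PRECONDITION & SPEC =====
-- A raises IndexError whenever b ≤ 0 (empty/short sieve array) or k ≤ 0
-- (primes[len(primes)] etc. out of range on the non-(-1) path);
-- Pre_ is exactly the set of inputs on which the Python A returns.
def Pre_find_min_l (a : Int) (b : Int) (k : Int) : Prop := 1 ≤ b ∧ 1 ≤ k
instance (a : Int) (b : Int) (k : Int) : Decidable (Pre_find_min_l a b k) := by
  unfold Pre_find_min_l; infer_instance

def pvWitness_find_min_l : Int × Int × Int := (2, 10, 2)

def Spec_find_min_l (a : Int) (b : Int) (k : Int) (out : Int) : Prop := out = find_min_l_alt a b k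
instance (a : Int) (b : Int) (k : Int) (out : Int) : Decidable (Spec_find_min_l a b k out) := by
  unfold Spec_find_min_l; infer_instance

-- ===== CLAIM (what is proved, stated in full; the proofs are below) =====
def Claim_equal_find_min_l : Prop := ∀ (a : Int) (b : Int) (k : Int), Dom_find_min_l a b k → Pre_find_min_l a b k → Spec_find_min_l a b k (find_min_l a b k)

-- ===== LEMMAS AND PROOFS =====

theorem pv_foldl_maxf_le {α : Type} (f : α → Int) (l : List α) (e c : Int) :
    l.foldl (fun acc x => max acc (f x)) e ≤ c ↔ e ≤ c ∧ ∀ x ∈ l, f x ≤ c := by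
  induction l generalizing e with
  | nil => simp
  | cons x t ih =>
      simp only [List.foldl_cons, ih, max_le_iff, List.mem_cons]
      constructor
      · rintro ⟨⟨h1, h2⟩, h3⟩
        exact ⟨h1, fun y hy => hy.elim (fun h => h ▸ h2) (h3 y)⟩
      · rintro ⟨h1, h2⟩
        exact ⟨⟨h1, h2 x (Or.inl rfl)⟩, fun y hy => h2 y (Or.inr hy)⟩

theorem pv_le_foldl_maxf {α : Type} (f : α → Int) (l : List α) (e : Int) :
    e ≤ l.foldl (fun acc x => max acc (f x)) e :=
  ((pv_foldl_maxf_le f l e _).mp le_rfl).1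

theorem pv_mem_le_foldl_maxf {α : Type} (f : α → Int) (l : List α) (e : Int)
    {x : α} (hx : x ∈ l) : f x ≤ l.foldl (fun acc x => max acc (f x)) e :=
  ((pv_foldl_maxf_le f l e _).mp le_rfl).2 x hx

-- number of elements of a sorted list strictly below s (= pointer position)
def pvIdx (ps : List Int) (s : Int) : Nat := (ps.takeWhile (fun p => decide (p < s))).length

theorem pvIdx_le (ps : List Int) (s : Int) : pvIdx ps s ≤ ps.length := by
  simpa [pvIdx] using (List.takeWhile_sublist (l := ps) (p := fun p => decide (p < s))).length_le

theorem pvIdx_lt_elem (ps : List Int) (s : Int) :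
    ∀ j, j < pvIdx ps s → ps.getD j 0 < s := by
  induction ps with
  | nil => intro j hj; simp [pvIdx] at hj
  | cons p t ih =>
      intro j hj
      by_cases hp : p < s
      · cases j with
        | zero => simpa using hp
        | succ j' =>
            simp only [pvIdx, List.takeWhile_cons, hp, decide_true, List.length_cons] at hj
            simpa using ih j' (by simpa [pvIdx] using Nat.lt_of_succ_lt_succ hj)
      · simp [pvIdx, List.takeWhile_cons, hp] at hj
  
theorem pvIdx_stop (ps : List Int) (s : Int) (h : pvIdx ps s < ps.length) :
    ¬ ps.getD (pvIdx ps s) 0 < s := by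
  induction ps with
  | nil => simp at h
  | cons p t ih =>
      by_cases hp : p < s
      · have hidx : pvIdx (p :: t) s = pvIdx t s + 1 := by
          simp [pvIdx, List.takeWhile_cons, hp]
        rw [hidx]
        simp only [List.getD_cons_succ]
        exact ih (by rw [hidx] at h; simpa using Nat.lt_of_succ_lt_succ h)
      · have hidx : pvIdx (p :: t) s = 0 := by simp [pvIdx, List.takeWhile_cons, hp]
        rw [hidx]; simpa using hp

theorem pvIdx_eq (ps : List Int) (s : Int) (t : Nat) (ht : t ≤ ps.length)
    (h1 : ∀ j, j < t → ps.getD j 0 < s)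
    (h2 : t < ps.length → ¬ ps.getD t 0 < s) : pvIdx ps s = t := by
  induction ps generalizing t with
  | nil => simp at ht; simp [pvIdx, ht]
  | cons p tl ih =>
      cases t with
      | zero =>
          have hp : ¬ p < s := by simpa using h2 (by simp)
          simp [pvIdx, List.takeWhile_cons, hp]
      | succ t' =>
          have hp : p < s := by simpa using h1 0 (Nat.succ_pos _)
          have : pvIdx tl s = t' := by
            apply ih t' (by simpa using ht)
            · intro j hj; simpa using h1 (j + 1) (by omega)
            · intro hl; simpa using h2 (by simpa using Nat.succ_lt_succ hl)
          simp [pvIdx, List.takeWhile_cons, hp] at this ⊢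
          omega

theorem pvIdx_mono (ps : List Int) (s s' : Int) (h : s ≤ s') :
    pvIdx ps s ≤ pvIdx ps s' := by
  by_contra hlt
  push_neg at hlt
  have h1 : pvIdx ps s' < ps.length := lt_of_lt_of_le hlt (pvIdx_le ps s)
  have h2 := pvIdx_stop ps s' h1
  have h3 := pvIdx_lt_elem ps s _ hlt
  omega

theorem pv_getD_lt (ps : List Int) (hs : ps.Pairwise (· < ·)) (i j : Nat)
    (hij : i < j) (hj : j < ps.length) : ps.getD i 0 < ps.getD j 0 := by
  rw [List.getD_eq_getElem ps 0 (by omega), List.getD_eq_getElem ps 0 hj]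
  exact List.pairwise_iff_getElem.mp hs i j (by omega) hj hij

theorem pv_getD_mono (ps : List Int) (hs : ps.Pairwise (· < ·)) (i j : Nat)
    (hij : i ≤ j) (hj : j < ps.length) : ps.getD i 0 ≤ ps.getD j 0 := by
  rcases Nat.lt_or_ge i j with h | h
  · exact le_of_lt (pv_getD_lt ps hs i j h hj)
  · have : i = j := by omega
    simp [this]

theorem pvIdx_getD_succ (ps : List Int) (hs : ps.Pairwise (· < ·)) (i : Nat)
    (hi : i < ps.length) : pvIdx ps (ps.getD i 0 + 1) = i + 1 := by
  apply pvIdx_eq ps _ (i + 1) (by omega)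
  · intro j hj
    have := pv_getD_mono ps hs j i (by omega) hi
    omega
  · intro hl
    have := pv_getD_lt ps hs i (i + 1) (by omega) hl
    omega

theorem pv_getD_mem (ps : List Int) (i : Nat) (hi : i < ps.length) :
    ps.getD i 0 ∈ ps := by
  rw [List.getD_eq_getElem ps 0 hi]
  exact List.getElem_mem hi

theorem pvAdvance_eq (ps : List Int) (s : Int) :
    ∀ (n : Nat) (j : Int), 0 ≤ j → j.toNat ≤ pvIdx ps s → pvIdx ps s - j.toNat = n →
    pvAdvance ps s j = (pvIdx ps s : Int) := by
  intro n
  induction n with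
  | zero =>
      intro j h0 hle hn
      have hj : j.toNat = pvIdx ps s := by omega
      rw [pvAdvance]
      rw [dif_neg]
      · omega
      rintro ⟨hlt, hget⟩
      rw [show j = ((pvIdx ps s : Nat) : Int) by omega, PySem.List.pyGetD_natCast] at hget
      exact pvIdx_stop ps s (by omega) hget
  | succ n ih =>
      intro j h0 hle hn
      have hjlt : j.toNat < pvIdx ps s := by omega
      have hjl : j.toNat < ps.length := lt_of_lt_of_le hjlt (pvIdx_le ps s)
      have hget := pvIdx_lt_elem ps s j.toNat hjlt
      rw [pvAdvance, dif_pos]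
      · exact ih (j + 1) (by omega) (by omega) (by omega)
      constructor
      · omega
      · rw [show j = ((j.toNat : Nat) : Int) by omega, PySem.List.pyGetD_natCast]
        exact hget

-- the needed window length for start s, as a function of the pointer position
def pvG (ps : List Int) (b k : Int) (s : Int) : Int :=
  if (pvIdx ps s : Int) + k ≤ (ps.length : Int) then
    PySem.List.pyGetD ps ((pvIdx ps s : Int) + k - 1) 0 - s + 1
  else b - s + 2

-- L1: the pointer scan equals the fold of the pure per-start function pvG
theorem pv_scan_eq (ps : List Int) (b k : Int) :
    ∀ (n : Nat) (lo j ans : Int), (b + 1 - lo).toNat = n → 0 ≤ j → j.toNat ≤ pvIdx ps lo →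
    ((PySem.List.pyRange lo (b + 1) 1).foldl
      (fun (st : Int × Int) s =>
        let j := pvAdvance ps s st.1
        if j + k ≤ (ps.length : Int) then (j, max st.2 (PySem.List.pyGetD ps (j + k - 1) 0 - s + 1))
        else (j, max st.2 (b - s + 2)))
      (j, ans)).2
    = (PySem.List.pyRange lo (b + 1) 1).foldl (fun acc s => max acc (pvG ps b k s)) ans := by
  intro n
  induction n with
  | zero =>
      intro lo j ans hn h0 hle
      rw [PySem.List.pyRange_one_eq_nil (by omega)]
      simp
  | succ n ih =>
      intro lo j ans hn h0 hle
      rw [PySem.List.pyRange_one_cons (by omega)]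
      have hadv : pvAdvance ps lo j = (pvIdx ps lo : Int) :=
        pvAdvance_eq ps lo _ j h0 hle rfl
      rw [List.foldl_cons]
      simp only [hadv]
      have hinit : (if ((pvIdx ps lo : Int)) + k ≤ (ps.length : Int) then
            ((pvIdx ps lo : Int), max ans (PySem.List.pyGetD ps ((pvIdx ps lo : Int) + k - 1) 0 - lo + 1))
          else ((pvIdx ps lo : Int), max ans (b - lo + 2)))
          = ((pvIdx ps lo : Int), max ans (pvG ps b k lo)) := by
        unfold pvG
        split_ifs <;> rfl
      rw [hinit, List.foldl_cons]
      exact ih (lo + 1) _ _ (by omega) (by omega)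
        (by simpa using pvIdx_mono ps lo (lo + 1) (by omega))

-- sieve facts ------------------------------------------------------------

theorem pv_set_self_false (l : List Bool) (x : Nat) : (l.set x false).getD x false = false := by
  by_cases hx : x < l.length
  · rw [List.getD_eq_getElem _ _ (by simpa using hx)]
    simp [List.getElem_set, hx]
  · rw [List.getD_eq_default _ _ (by simpa using Nat.le_of_not_lt hx)]

theorem pv_set_false_getD (l : List Bool) (x i : Nat) (h : l.getD i false = false) :
    (l.set x false).getD i false = false := by
  by_cases hi : i < l.length
  · rw [List.getD_eq_getElem _ _ (by simpa using hi)]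
    rw [List.getD_eq_getElem _ _ hi] at h
    rw [List.getElem_set]
    split
    · rfl
    · exact h
  · rw [List.getD_eq_default _ _ (by simpa using Nat.le_of_not_lt hi)]

theorem pv_foldl_set_false (l : List Int) (arr : List Bool) (i : Nat)
    (h : arr.getD i false = false) :
    (l.foldl (fun l2 j => l2.set j.toNat false) arr).getD i false = false := by
  induction l generalizing arr with
  | nil => exact h
  | cons x t ih => exact ih _ (pv_set_false_getD _ _ _ h)

theorem pv_outer_set_false (rng : List Int) (n : Int) (arr : List Bool) (i : Nat)
    (h : arr.getD i false = false) :
    (rng.foldl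
      (fun l x =>
        if l.getD x.toNat false then
          (PySem.List.pyRange (x * x) (n + 1) x).foldl (fun l2 j => l2.set j.toNat false) l
        else l) arr).getD i false = false := by
  induction rng generalizing arr with
  | nil => exact h
  | cons x t ih =>
      simp only [List.foldl_cons]
      apply ih
      split
      · exact pv_foldl_set_false _ _ _ h
      · exact h

theorem pvSieve_sorted (b : Int) : (pvSieve b).Pairwise (· < ·) := by
  unfold pvSieve
  exact (PySem.List.pairwise_lt_pyRange_one 0 (b + 1)).filter _

theorem pvSieve_mem (b p : Int) (hp : p ∈ pvSieve b) : 2 ≤ p ∧ p ≤ b := by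
  unfold pvSieve at hp
  rw [List.mem_filter] at hp
  obtain ⟨hmem, hpred⟩ := hp
  rw [PySem.List.mem_pyRange_one] at hmem
  refine ⟨?_, by omega⟩
  by_contra hlt
  push_neg at hlt
  have hfalse : (((List.replicate (b + 1).toNat true).set 0 false).set 1 false).getD p.toNat false = false := by
    have h01 : p.toNat = 0 ∨ p.toNat = 1 := by omega
    rcases h01 with h | h <;> rw [h]
    · exact pv_set_false_getD _ _ _ (pv_set_self_false _ 0)
    · exact pv_set_self_false _ 1
  rw [pv_outer_set_false _ _ _ _ hfalse] at hpred
  simp at hpred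

-- main proof -------------------------------------------------------------

theorem find_min_l_spec : Claim_equal_find_min_l := by
  intro a b k _ hpre
  obtain ⟨hb, hk⟩ := hpre
  unfold Spec_find_min_l find_min_l find_min_l_alt
  set ps := (pvSieve b).filter (fun p => a ≤ p) with hps
  by_cases hlt : (ps.length : Int) < k
  · simp [hlt]
  · simp only [if_neg hlt]
    have hsorted : ps.Pairwise (· < ·) := (pvSieve_sorted b).filter _
    have hPS : ∀ i : Nat, i < ps.length → a ≤ ps.getD i 0 ∧ 2 ≤ ps.getD i 0 ∧ ps.getD i 0 ≤ b := by
      intro i hi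
      have hmem := pv_getD_mem ps i hi
      rw [hps, List.mem_filter] at hmem
      obtain ⟨h1, h2⟩ := hmem
      have h3 := pvSieve_mem b _ h1
      simp only [decide_eq_true_eq] at h2
      exact ⟨h2, h3.1, h3.2⟩
    obtain ⟨K, hkK⟩ : ∃ K : Nat, k = (K : Int) := ⟨k.toNat, by omega⟩
    have hK1 : 1 ≤ K := by omega
    have hKm : K ≤ ps.length := by omega
    have hg : ∀ i : Nat, PySem.List.pyGetD ps (i : Int) 0 = ps.getD i 0 := by
      intro i; simp
    have hg0 : PySem.List.pyGetD ps 0 0 = ps.getD 0 0 := by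
      simpa using hg 0
    have hB := pv_scan_eq ps b k ((b + 1 - (PySem.List.pyGetD ps 0 0 + 1)).toNat)
      (PySem.List.pyGetD ps 0 0 + 1) 0 (PySem.List.pyGetD ps (k - 1) 0 - a + 1) rfl (by omega) (by simp)
    rw [hB]
    have ht1ge : 1 ≤ PySem.List.pyGetD ps (k - 1) 0 - a + 1 := by
      have h := (hPS (K - 1) (by omega)).1
      rw [show (k - 1 : Int) = ((K - 1 : Nat) : Int) by omega, hg]
      omega
    have ht2eq : PySem.List.pyGetD ps ((ps.length : Int) - k) 0 = ps.getD (ps.length - K) 0 := by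
      rw [show ((ps.length : Int) - k) = ((ps.length - K : Nat) : Int) by omega, hg]
    have hVB : (PySem.List.pyRange 0 ((ps.length : Int) - k) 1).foldl
        (fun mn i => max mn (PySem.List.pyGetD ps (i + k) 0 - PySem.List.pyGetD ps i 0))
        (max (PySem.List.pyGetD ps (k - 1) 0 - a + 1)
             (b - PySem.List.pyGetD ps ((ps.length : Int) - k) 0 + 1))
        ≤ (PySem.List.pyRange (PySem.List.pyGetD ps 0 0 + 1) (b + 1) 1).foldl
            (fun acc s => max acc (pvG ps b k s)) (PySem.List.pyGetD ps (k - 1) 0 - a + 1) := by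
      apply (pv_foldl_maxf_le _ _ _ _).mpr
      refine ⟨max_le (pv_le_foldl_maxf _ _ _) ?_, ?_⟩
      · rw [ht2eq]
        by_cases hlastb : ps.getD (ps.length - K) 0 < b
        · have hmemR : (ps.getD (ps.length - K) 0 + 1)
              ∈ PySem.List.pyRange (PySem.List.pyGetD ps 0 0 + 1) (b + 1) 1 := by
            rw [PySem.List.mem_pyRange_one]
            have := pv_getD_mono ps hsorted 0 (ps.length - K) (by omega) (by omega)
            rw [hg0]
            omega
          have hle := pv_mem_le_foldl_maxf (pvG ps b k) _
            (PySem.List.pyGetD ps (k - 1) 0 - a + 1) hmemR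
          have hpv : pvG ps b k (ps.getD (ps.length - K) 0 + 1)
              = b - ps.getD (ps.length - K) 0 + 1 := by
            unfold pvG
            rw [pvIdx_getD_succ ps hsorted (ps.length - K) (by omega)]
            rw [if_neg (by omega)]
            ring
          omega
        · have hlb : ps.getD (ps.length - K) 0 ≤ b := (hPS _ (by omega)).2.2
          have hle := pv_le_foldl_maxf (pvG ps b k)
            (PySem.List.pyRange (PySem.List.pyGetD ps 0 0 + 1) (b + 1) 1)
            (PySem.List.pyGetD ps (k - 1) 0 - a + 1)
          omega
      · intro i hiR
        rw [PySem.List.mem_pyRange_one] at hiR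
        obtain ⟨hi0, hiu⟩ := hiR
        obtain ⟨I, hI⟩ : ∃ I : Nat, i = (I : Int) := ⟨i.toNat, by omega⟩
        have hIlt : I + K < ps.length := by omega
        have hterm : PySem.List.pyGetD ps (i + k) 0 - PySem.List.pyGetD ps i 0
            = ps.getD (I + K) 0 - ps.getD I 0 := by
          rw [hI, show ((I : Int) + k) = ((I + K : Nat) : Int) by omega, hg, hg]
        have hltIK : ps.getD I 0 < ps.getD (I + K) 0 :=
          pv_getD_lt ps hsorted I (I + K) (by omega) hIlt
        have hub : ps.getD (I + K) 0 ≤ b := (hPS (I + K) hIlt).2.2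
        have hmemR : (ps.getD I 0 + 1)
            ∈ PySem.List.pyRange (PySem.List.pyGetD ps 0 0 + 1) (b + 1) 1 := by
          rw [PySem.List.mem_pyRange_one]
          have := pv_getD_mono ps hsorted 0 I (by omega) (by omega)
          rw [hg0]
          omega
        have hle := pv_mem_le_foldl_maxf (pvG ps b k) _
          (PySem.List.pyGetD ps (k - 1) 0 - a + 1) hmemR
        have hpv : pvG ps b k (ps.getD I 0 + 1) = ps.getD (I + K) 0 - ps.getD I 0 := by
          unfold pvG
          rw [pvIdx_getD_succ ps hsorted I (by omega)]
          rw [if_pos (by omega)]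
          rw [show ((I + 1 : Nat) : Int) + k - 1 = ((I + K : Nat) : Int) by omega, hg]
          ring
        omega
    have hBV : (PySem.List.pyRange (PySem.List.pyGetD ps 0 0 + 1) (b + 1) 1).foldl
            (fun acc s => max acc (pvG ps b k s)) (PySem.List.pyGetD ps (k - 1) 0 - a + 1)
        ≤ (PySem.List.pyRange 0 ((ps.length : Int) - k) 1).foldl
            (fun mn i => max mn (PySem.List.pyGetD ps (i + k) 0 - PySem.List.pyGetD ps i 0))
            (max (PySem.List.pyGetD ps (k - 1) 0 - a + 1)
                 (b - PySem.List.pyGetD ps ((ps.length : Int) - k) 0 + 1)) := by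
      apply (pv_foldl_maxf_le _ _ _ _).mpr
      constructor
      · exact le_trans (le_max_left _ _) (pv_le_foldl_maxf _ _ _)
      · intro s hsR
        rw [PySem.List.mem_pyRange_one, hg0] at hsR
        obtain ⟨hs1, hs2⟩ := hsR
        have hi1 : 1 ≤ pvIdx ps s := by
          by_contra h0
          have hstop := pvIdx_stop ps s (by omega)
          rw [show pvIdx ps s = 0 by omega] at hstop
          omega
        have him := pvIdx_le ps s
        have hprev : ps.getD (pvIdx ps s - 1) 0 < s := pvIdx_lt_elem ps s _ (by omega)
        unfold pvG
        split_ifs with hcase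
        · have hiK : pvIdx ps s + K ≤ ps.length := by omega
          have hmemV : (((pvIdx ps s - 1 : Nat)) : Int)
              ∈ PySem.List.pyRange 0 ((ps.length : Int) - k) 1 := by
            rw [PySem.List.mem_pyRange_one]
            omega
          have hgb := pv_mem_le_foldl_maxf
            (fun i => PySem.List.pyGetD ps (i + k) 0 - PySem.List.pyGetD ps i 0) _
            (max (PySem.List.pyGetD ps (k - 1) 0 - a + 1)
                 (b - PySem.List.pyGetD ps ((ps.length : Int) - k) 0 + 1)) hmemV
          beta_reduce at hgb
          have hv1 : PySem.List.pyGetD ps (((pvIdx ps s - 1 : Nat) : Int) + k) 0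
              = ps.getD (pvIdx ps s - 1 + K) 0 := by
            rw [show (((pvIdx ps s - 1 : Nat) : Int) + k) = ((pvIdx ps s - 1 + K : Nat) : Int) by omega, hg]
          have hv2 := hg (pvIdx ps s - 1)
          have hv3 : PySem.List.pyGetD ps ((pvIdx ps s : Int) + k - 1) 0
              = ps.getD (pvIdx ps s - 1 + K) 0 := by
            rw [show ((pvIdx ps s : Int) + k - 1) = ((pvIdx ps s - 1 + K : Nat) : Int) by omega, hg]
          rw [hv3]
          rw [hv1, hv2] at hgb
          omega
        · have hiK : ps.length < pvIdx ps s + K := by omega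
          have hmono : ps.getD (ps.length - K) 0 ≤ ps.getD (pvIdx ps s - 1) 0 :=
            pv_getD_mono ps hsorted _ _ (by omega) (by omega)
          have hseed := pv_le_foldl_maxf
            (fun i => PySem.List.pyGetD ps (i + k) 0 - PySem.List.pyGetD ps i 0)
            (PySem.List.pyRange 0 ((ps.length : Int) - k) 1)
            (max (PySem.List.pyGetD ps (k - 1) 0 - a + 1)
                 (b - PySem.List.pyGetD ps ((ps.length : Int) - k) 0 + 1))
          have h2f := le_trans (le_max_right (PySem.List.pyGetD ps (k - 1) 0 - a + 1)
            (b - PySem.List.pyGetD ps ((ps.length : Int) - k) 0 + 1)) hseed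
          beta_reduce at h2f
          rw [ht2eq] at h2f
          omega
    by_cases hmk : (ps.length : Int) = k
    · rw [if_pos hmk]
      rw [show ((ps.length : Int) - k) = 0 by omega,
        PySem.List.pyRange_one_eq_nil (le_refl (0 : Int)), List.foldl_nil] at hVB hBV
      exact le_antisymm hVB hBV
    · rw [if_neg hmk]
      exact le_antisymm hVB hBV
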